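-- pv_equiv track=rewrite | github.com/pamenov/DI_Learning | week_2/day4/daily_challenge/challenge.py | proceed_data
-- ===== SOURCE A (Python) =====
-- def proceed_data(data):
--     words = []
--     word = []
--     for i in range(len(data)):
--         symb = data[i]
--         if symb.isalpha():
--             word.append(symb)
--         elif len(word) != 0:
--             words.append("".join(word))
--             word = []
--         if i == len(data) - 1 and symb.isalpha():
--             words.append("".join(word))
--     return ' '.join(words)
-- ===== SOURCE B (Python) =====
-- def proceed_data(data):
--     return ' '.join(''.join(c if c.isalpha() else ' ' for c in data).split())
-- ===== Notes on version B (the rewrite author's own statement) =====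
-- stated objective: idiomatic
-- what changed: Replaces the manual index loop with a word buffer and last-index special case by blanking every non-alphabetic character to a space and letting str.split() extract the word runs.
import Mathlib
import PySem

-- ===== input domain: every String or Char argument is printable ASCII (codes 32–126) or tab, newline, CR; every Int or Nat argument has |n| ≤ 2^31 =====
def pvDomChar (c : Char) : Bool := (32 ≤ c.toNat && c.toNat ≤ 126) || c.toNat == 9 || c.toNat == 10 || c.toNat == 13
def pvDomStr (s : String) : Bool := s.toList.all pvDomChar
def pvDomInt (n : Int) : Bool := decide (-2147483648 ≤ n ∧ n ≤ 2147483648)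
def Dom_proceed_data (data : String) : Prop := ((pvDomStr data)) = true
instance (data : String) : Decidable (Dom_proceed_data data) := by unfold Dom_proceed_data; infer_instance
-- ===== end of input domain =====

-- B blanks every non-alphabetic character to a space and lets split() find the word runs,
-- instead of A's index loop with a word buffer and a last-index special case (idiomatic; same cost).


-- ===== PORT A =====
-- the 'if symb.isalpha(): … elif len(word) != 0: …' part of the loop body (state = (words, word))
def pdInner (st : List (List Char) × List Char) (symb : Char) : List (List Char) × List Char :=
  if PySem.Chars.isalpha symb = true then (st.1, st.2 ++ [symb])
  else if st.2.length ≠ 0 then (st.1 ++ [st.2], ([] : List Char))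
  else st

-- one iteration of 'for i in range(len(data))', including the 'if i == len(data) - 1 …' check
def pdStep (cs : List Char) (st : List (List Char) × List Char) (i : Int) :
    List (List Char) × List Char :=
  let symb := PySem.List.pyGetD cs i ' '
  let st1 := pdInner st symb
  if i = (cs.length : Int) - 1 ∧ PySem.Chars.isalpha symb = true then (st1.1 ++ [st1.2], st1.2)
  else st1

def proceed_data (data : String) : String :=
  String.ofList (PySem.Chars.join [' ']
    (((PySem.List.pyRange 0 (data.toList.length : Int) 1).foldl (pdStep data.toList) ([], [])).1))

-- ===== PORT B =====
def proceed_data_alt (data : String) : String :=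
  String.ofList (PySem.Chars.join [' ']
    (PySem.Chars.split₀ (data.toList.map (fun c => if PySem.Chars.isalpha c then c else ' '))))

-- ===== PRECONDITION & SPEC =====
def Spec_proceed_data (data : String) (out : String) : Prop := out = proceed_data_alt data
instance (data : String) (out : String) : Decidable (Spec_proceed_data data out) := by unfold Spec_proceed_data; infer_instance

-- ===== CLAIM (what is proved, stated in full; the proofs are below) =====
def Claim_equal_proceed_data : Prop := ∀ (data : String), Dom_proceed_data data → Spec_proceed_data data (proceed_data data)

-- ===== LEMMAS AND PROOFS =====

lemma alpha_not_space (c : Char) (h : PySem.Chars.isalpha c = true) :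
    PySem.Chars.isspace c = false := by
  have hr : (65 ≤ c.toNat ∧ c.toNat ≤ 90) ∨ (97 ≤ c.toNat ∧ c.toNat ≤ 122) := by
    simp only [PySem.Chars.isalpha, PySem.Chars.isupper, PySem.Chars.islower,
      Bool.or_eq_true, Bool.and_eq_true, decide_eq_true_eq] at h
    rcases h with ⟨h1, h2⟩ | ⟨h1, h2⟩
    · exact Or.inl ⟨UInt32.le_iff_toNat_le.mp (Char.le_def.mp h1),
        UInt32.le_iff_toNat_le.mp (Char.le_def.mp h2)⟩
    · exact Or.inr ⟨UInt32.le_iff_toNat_le.mp (Char.le_def.mp h1),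
        UInt32.le_iff_toNat_le.mp (Char.le_def.mp h2)⟩
  simp only [PySem.Chars.isspace, Bool.or_eq_false_iff, Bool.and_eq_false_iff,
    decide_eq_false_iff_not]
  omega

-- split₀.go on the blanked list computes the same words as A's inner loop, plus a final flush
lemma go_eq_fold (cs : List Char) : ∀ (w : List Char) (acc : List (List Char)),
    PySem.Chars.split₀.go (cs.map (fun c => if PySem.Chars.isalpha c then c else ' '))
      w.reverse acc =
    (let st := cs.foldl pdInner (acc.reverse, w)
     if st.2.isEmpty then st.1 else st.1 ++ [st.2]) := by
  induction cs with
  | nil =>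
      intro w acc
      simp only [List.map_nil, PySem.Chars.split₀.go, List.foldl_nil]
      by_cases hw : w = []
      · simp [hw]
      · simp [hw, List.isEmpty_iff]
  | cons c cs ih =>
      intro w acc
      by_cases ha : PySem.Chars.isalpha c = true
      · simp only [List.map_cons, if_pos ha, PySem.Chars.split₀.go,
          alpha_not_space c ha, Bool.false_eq_true, if_false, List.foldl_cons]
        have hrev : c :: w.reverse = (w ++ [c]).reverse := by simp
        rw [hrev, ih (w ++ [c]) acc]
        simp [pdInner, ha]
      · have hsp : PySem.Chars.isspace ' ' = true := by decide
        simp only [List.map_cons, if_neg ha, PySem.Chars.split₀.go, hsp, if_pos,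
          List.foldl_cons]
        by_cases hw : w = []
        · subst hw
          simp only [List.reverse_nil, List.isEmpty_nil, if_pos]
          have hih := ih [] acc
          simp only [List.reverse_nil] at hih
          rw [hih]
          simp [pdInner, ha]
        · rw [if_neg (by simp [List.isEmpty_iff, hw])]
          rw [List.reverse_reverse]
          have hih := ih [] (w :: acc)
          simp only [List.reverse_nil] at hih
          rw [hih]
          simp [pdInner, ha, hw]

-- the index loop without its last iteration is the inner loop over the chars except the last
lemma prefix_fold (cs : List Char) (h : cs ≠ []) :
    (PySem.List.pyRange 0 ((cs.length : Int) - 1) 1).foldl (pdStep cs) ([], []) =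
      cs.dropLast.foldl pdInner ([], []) := by
  have hlen1 : 1 ≤ cs.length := List.length_pos_iff.mpr h
  have hlen : ((cs.dropLast.length : Int)) = (cs.length : Int) - 1 := by
    simp [List.length_dropLast]; omega
  have hcong : (PySem.List.pyRange 0 ((cs.length : Int) - 1) 1).foldl (pdStep cs) ([], []) =
      (PySem.List.pyRange 0 ((cs.dropLast.length : Int)) 1).foldl
        (fun st i => pdInner st (PySem.List.pyGetD cs.dropLast i ' ')) ([], []) := by
    rw [hlen]
    apply PySem.List.foldl_congr_mem
    intro st i hi
    rw [PySem.List.mem_pyRange_one] at hi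
    obtain ⟨h0, h1⟩ := hi
    have hget : PySem.List.pyGetD cs i ' ' = PySem.List.pyGetD cs.dropLast i ' ' := by
      rw [PySem.List.pyGetD_eq_getElem cs ' ' h0 (by omega),
          PySem.List.pyGetD_eq_getElem cs.dropLast ' ' h0 (by simp [List.length_dropLast]; omega)]
      exact (List.getElem_dropLast _).symm
    simp only [pdStep, hget]
    rw [if_neg (fun hc => by omega)]
  rw [hcong]
  exact PySem.List.foldl_pyRange_zero_pyGetD' cs.dropLast ' ' pdInner ([], [])

-- ===== VERDICT (by name: the statement is the Claim_ definition above) =====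
theorem proceed_data_spec : Claim_equal_proceed_data := by
  intro data _
  unfold Spec_proceed_data proceed_data proceed_data_alt
  generalize data.toList = cs
  by_cases h : cs = []
  · subst h; decide
  · have hn : 1 ≤ cs.length := List.length_pos_iff.mpr h
    have hsplit : PySem.List.pyRange 0 (cs.length : Int) 1 =
        PySem.List.pyRange 0 ((cs.length : Int) - 1) 1 ++ [(cs.length : Int) - 1] := by
      have hsr := PySem.List.pyRange_one_succ_right (a := 0) (b := (cs.length : Int) - 1) (by omega)
      rw [← hsr]; congr 1; omega
    rw [hsplit]
    simp only [List.foldl_append, List.foldl_cons, List.foldl_nil, prefix_fold cs h]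
    set st := cs.dropLast.foldl pdInner (([] : List (List Char)), ([] : List Char)) with hst
    have hget : PySem.List.pyGetD cs ((cs.length : Int) - 1) ' ' = cs.getLast h := by
      rw [PySem.List.pyGetD_eq_getElem cs ' ' (by omega) (by omega), List.getLast_eq_getElem]
      congr 1
      omega
    have hB := go_eq_fold cs [] []
    simp only [List.reverse_nil] at hB
    rw [PySem.Chars.split₀, hB]
    conv_rhs => rw [← List.dropLast_append_getLast h, List.foldl_append, List.foldl_cons,
      List.foldl_nil, ← hst]
    simp only [pdStep, hget, true_and]
    by_cases ha : PySem.Chars.isalpha (cs.getLast h) = true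
    · rw [if_pos ha]
      have h2 : (pdInner st (cs.getLast h)).2 = st.2 ++ [cs.getLast h] := by
        simp [pdInner, ha]
      simp [h2]
    · rw [if_neg ha]
      have h2 : (pdInner st (cs.getLast h)).2.isEmpty = true := by
        simp only [pdInner, if_neg ha]
        by_cases hw : st.2.length ≠ 0
        · simp [hw]
        · simp only [ne_eq, not_not] at hw
          have hz : st.2 = [] := List.length_eq_zero_iff.mp hw
          simp [hz]
      simp [h2]
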